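-- pv_equiv track=rewrite | github.com/MEnisSen/multiagent-orchestration-system | programmatic_agent_runner.py | extract_tasks_from_messages
-- ===== SOURCE A (Python) =====
-- from typing import Dict, List
--
-- def extract_tasks_from_messages(messages: List[Dict[str, str]]) -> List[Dict]:
--     """
--     Extract task information from the conversation.
--     """
--     tasks = []
--
--     for msg in messages:
--         content = msg.get("content", "")
--         if isinstance(content, str):
--             # Look for task-related content
--             lines = content.split('\n')
--             for line in lines:
--                 line = line.strip()
--                 # Look for numbered lists, bullet points, or task keywords
--                 if (any(line.startswith(prefix) for prefix in ['1.', '2.', '3.', '4.', '5.', '- ', '* ']) or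
--                     any(keyword in line.lower() for keyword in ['task', 'step', 'implement', 'create', 'write', 'test'])):
--                     if len(line) > 15 and not line.startswith('```'):  # Avoid code blocks and very short lines
--                         # Clean up the line
--                         clean_line = line.lstrip('1234567890.- *').strip()
--                         if clean_line and len(clean_line) > 10:
--                             tasks.append({
--                                 "description": clean_line,
--                                 "status": "pending"
--                             })
--
--     # Remove duplicates and limit
--     seen = set()
--     unique_tasks = []
--     for task in tasks:
--         desc = task["description"].lower()
--         if desc not in seen and len(unique_tasks) < 6:
--             seen.add(desc)
--             unique_tasks.append(task)
--
--     # If no tasks found, create default workflow tasks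
--     if not unique_tasks:
--         unique_tasks = [
--             {"description": "Parse user request and create implementation plan", "status": "pending"},
--             {"description": "Implement the requested functionality", "status": "pending"},
--             {"description": "Write comprehensive unit tests", "status": "pending"},
--             {"description": "Run tests and validate functionality", "status": "pending"},
--             {"description": "Finalize and integrate the code", "status": "pending"}
--         ]
--
--     return unique_tasks
-- ===== SOURCE B (Python) =====
-- from typing import Dict, List
--
-- _PREFIXES = ('1.', '2.', '3.', '4.', '5.', '- ', '* ')
-- _KEYWORDS = ('task', 'step', 'implement', 'create', 'write', 'test')
--
-- def _line_task(raw: str):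
--     """Return the cleaned task description for one line, or None if it is filtered out."""
--     line = raw.strip()
--     if len(line) <= 15 or line.startswith('```'):
--         return None
--     if not (any(line.startswith(p) for p in _PREFIXES)
--             or any(k in line.lower() for k in _KEYWORDS)):
--         return None
--     clean = line.lstrip('1234567890.- *').strip()
--     return clean if len(clean) > 10 else None
--
-- def extract_tasks_from_messages(messages: List[Dict[str, str]]) -> List[Dict]:
--     """Single fused pass: filter, dedupe and cap (6) while scanning, breaking early."""
--     seen = set()
--     unique_tasks = []
--     for msg in messages:
--         if len(unique_tasks) >= 6:
--             break
--         content = msg.get("content", "")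
--         if not isinstance(content, str):
--             continue
--         for raw in content.split('\n'):
--             clean = _line_task(raw)
--             if clean is None:
--                 continue
--             desc = clean.lower()
--             if desc in seen:
--                 continue
--             seen.add(desc)
--             unique_tasks.append({"description": clean, "status": "pending"})
--             if len(unique_tasks) >= 6:
--                 break
--     if unique_tasks:
--         return unique_tasks
--     return [
--         {"description": "Parse user request and create implementation plan", "status": "pending"},
--         {"description": "Implement the requested functionality", "status": "pending"},
--         {"description": "Write comprehensive unit tests", "status": "pending"},
--         {"description": "Run tests and validate functionality", "status": "pending"},
--         {"description": "Finalize and integrate the code", "status": "pending"}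
--     ]
-- ===== Notes on version B (the rewrite author's own statement) =====
-- stated objective: alternative
-- what changed: Replaces A's two sequential passes (collect all matching lines into a full tasks list, then a separate dedupe-and-cap loop) by one fused scan with an Option-returning line filter that dedupes and caps at 6 inline and breaks out of the loops as soon as 6 unique tasks are found.
import Mathlib
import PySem

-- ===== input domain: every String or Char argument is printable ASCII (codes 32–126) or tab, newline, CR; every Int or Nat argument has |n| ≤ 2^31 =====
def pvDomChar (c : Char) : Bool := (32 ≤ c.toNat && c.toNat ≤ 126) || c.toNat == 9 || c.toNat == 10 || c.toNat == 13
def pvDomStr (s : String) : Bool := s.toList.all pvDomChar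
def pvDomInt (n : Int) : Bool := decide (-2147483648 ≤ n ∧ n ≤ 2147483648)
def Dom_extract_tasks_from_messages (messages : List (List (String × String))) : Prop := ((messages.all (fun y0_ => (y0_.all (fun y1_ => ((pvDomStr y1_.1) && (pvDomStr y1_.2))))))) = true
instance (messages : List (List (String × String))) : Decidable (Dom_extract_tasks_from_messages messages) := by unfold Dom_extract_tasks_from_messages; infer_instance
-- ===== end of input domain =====

-- B fuses A's two passes (collect all candidate lines, then dedupe/cap) into one scan that
-- dedupes and caps at 6 inline and breaks early; same return value, no speed claim.

-- shared literal constants and exact ports of Python primitives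
def pvPrefixes : List String := ["1.", "2.", "3.", "4.", "5.", "- ", "* "]
def pvKeywords : List String := ["task", "step", "implement", "create", "write", "test"]
-- exact port of str.lstrip(chars): drop leading characters that occur in chars
def pvLstrip (s chars : String) : String :=
  String.ofList (s.toList.dropWhile (fun c => chars.toList.contains c))
-- content.split('\n')  (separator nonempty, so split? is always some)
def pvSplitNL (content : String) : List String :=
  (PySem.Str.split? content "\n").getD []
def pvTask (clean : String) : List (String × String) :=
  [("description", clean), ("status", "pending")]
def pvDefaults : List (List (String × String)) :=
  [[("description", "Parse user request and create implementation plan"), ("status", "pending")],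
   [("description", "Implement the requested functionality"), ("status", "pending")],
   [("description", "Write comprehensive unit tests"), ("status", "pending")],
   [("description", "Run tests and validate functionality"), ("status", "pending")],
   [("description", "Finalize and integrate the code"), ("status", "pending")]]

-- ===== PORT A =====
-- inner-loop body of A's first pass
def pvStepLineA (tasks : List (List (String × String))) (raw : String) : List (List (String × String)) :=
  let line := PySem.Str.strip raw
  if pvPrefixes.any (fun p => PySem.Str.startswith line p) ||
     pvKeywords.any (fun k => PySem.Str.isIn k (PySem.Str.lower line)) then
    if 15 < PySem.Str.len line ∧ ¬ PySem.Str.startswith line "```" = true then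
      let clean := PySem.Str.strip (pvLstrip line "1234567890.- *")
      if clean ≠ "" ∧ 10 < PySem.Str.len clean then
        tasks ++ [pvTask clean]
      else tasks
    else tasks
  else tasks

-- body of A's second (dedupe + cap) pass
def pvDedupStepA (st : PySem.Set String × List (List (String × String)))
    (task : List (String × String)) : PySem.Set String × List (List (String × String)) :=
  let desc := PySem.Str.lower (PySem.Dict.getD ⟨task⟩ "description" "")
  if desc ∉ st.1 ∧ st.2.length < 6 then (PySem.Set.add st.1 desc, st.2 ++ [task]) else st

-- body of A's outer loop: content = msg.get("content",""), then the line loop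
def pvStepMsgA (tasks : List (List (String × String))) (msg : List (String × String)) :
    List (List (String × String)) :=
  (pvSplitNL (PySem.Dict.getD ⟨msg⟩ "content" "")).foldl pvStepLineA tasks

def extract_tasks_from_messages (messages : List (List (String × String))) :
    List (List (String × String)) :=
  let tasks := messages.foldl pvStepMsgA []
  let unique := (tasks.foldl pvDedupStepA (PySem.Set.empty, [])).2
  if unique = [] then pvDefaults else unique

-- ===== PORT B =====
-- B's line filter: the cleaned description, or none if the line is filtered out
def pvLineTask (raw : String) : Option String :=
  let line := PySem.Str.strip raw
  if PySem.Str.len line ≤ 15 ∨ PySem.Str.startswith line "```" = true then none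
  else if ¬ (pvPrefixes.any (fun p => PySem.Str.startswith line p) ||
             pvKeywords.any (fun k => PySem.Str.isIn k (PySem.Str.lower line))) = true then none
  else
    let clean := PySem.Str.strip (pvLstrip line "1234567890.- *")
    if PySem.Str.len clean ≤ 10 then none else some clean

-- B's inner loop: scan the lines of one message, dedupe/cap inline, break at 6
def pvScanLines : List String → PySem.Set String → List (List (String × String)) →
    PySem.Set String × List (List (String × String))
  | [], seen, acc => (seen, acc)
  | raw :: rest, seen, acc =>
    match pvLineTask raw with
    | none => pvScanLines rest seen acc
    | some clean =>
      let desc := PySem.Str.lower clean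
      if desc ∈ seen then pvScanLines rest seen acc
      else
        let acc' := acc ++ [pvTask clean]
        if 6 ≤ acc'.length then (PySem.Set.add seen desc, acc')   -- break
        else pvScanLines rest (PySem.Set.add seen desc) acc'

-- B's outer loop over messages, breaking once 6 unique tasks are collected
def pvCollect : List (List (String × String)) → PySem.Set String →
    List (List (String × String)) → List (List (String × String))
  | [], _, acc => acc
  | msg :: rest, seen, acc =>
    if 6 ≤ acc.length then acc
    else
      let st := pvScanLines (pvSplitNL (PySem.Dict.getD ⟨msg⟩ "content" "")) seen acc
      pvCollect rest st.1 st.2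

def extract_tasks_from_messages_alt (messages : List (List (String × String))) :
    List (List (String × String)) :=
  let unique := pvCollect messages PySem.Set.empty []
  if unique = [] then pvDefaults else unique

-- ===== PRECONDITION & SPEC =====
def Spec_extract_tasks_from_messages (messages : List (List (String × String))) (out : List (List (String × String))) : Prop := out = extract_tasks_from_messages_alt messages
instance (messages : List (List (String × String))) (out : List (List (String × String))) : Decidable (Spec_extract_tasks_from_messages messages out) := by unfold Spec_extract_tasks_from_messages; infer_instance

-- ===== CLAIM (what is proved, stated in full; the proofs are below) =====
def Claim_equal_extract_tasks_from_messages : Prop := ∀ (messages : List (List (String × String))), Dom_extract_tasks_from_messages messages → Spec_extract_tasks_from_messages messages (extract_tasks_from_messages messages)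

-- ===== LEMMAS AND PROOFS =====

-- the stream of candidate descriptions, in scan order
def pvCands (messages : List (List (String × String))) : List String :=
  messages.flatMap (fun msg =>
    (pvSplitNL (PySem.Dict.getD ⟨msg⟩ "content" "")).filterMap pvLineTask)

-- the full (no-break) dedupe/cap pass over candidate descriptions, mirroring A's second loop
def pvDD : List String → PySem.Set String × List (List (String × String)) →
    PySem.Set String × List (List (String × String))
  | [], st => st
  | c :: cs, st =>
    let d := PySem.Str.lower c
    pvDD cs (if d ∉ st.1 ∧ st.2.length < 6 then (PySem.Set.add st.1 d, st.2 ++ [pvTask c]) else st)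

theorem pvGetD_task (c : String) :
    PySem.Dict.getD ⟨pvTask c⟩ "description" "" = c := by
  simp [pvTask, PySem.Dict.getD, PySem.Dict.get?]

theorem pvStepLineA_eq (tasks : List (List (String × String))) (raw : String) :
    pvStepLineA tasks raw = tasks ++ ((pvLineTask raw).toList.map pvTask) := by
  unfold pvStepLineA pvLineTask
  by_cases hc1 : (pvPrefixes.any (fun p => PySem.Str.startswith (PySem.Str.strip raw) p) ||
      pvKeywords.any (fun k => PySem.Str.isIn k (PySem.Str.lower (PySem.Str.strip raw)))) = true
  · rw [if_pos hc1]
    by_cases h2 : 15 < PySem.Str.len (PySem.Str.strip raw) ∧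
        ¬ PySem.Str.startswith (PySem.Str.strip raw) "```" = true
    · rw [if_neg (show ¬ (PySem.Str.len (PySem.Str.strip raw) ≤ 15 ∨
          PySem.Str.startswith (PySem.Str.strip raw) "```" = true) from by
            rcases h2 with ⟨ha, hb⟩; exact not_or.mpr ⟨not_le.mpr ha, hb⟩),
        if_neg (not_not_intro hc1), if_pos h2]
      by_cases h3 : PySem.Str.strip (pvLstrip (PySem.Str.strip raw) "1234567890.- *") ≠ "" ∧
          10 < PySem.Str.len (PySem.Str.strip (pvLstrip (PySem.Str.strip raw) "1234567890.- *"))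
      · rw [if_pos h3, if_neg (not_le.mpr h3.2)]
        simp
      · rw [if_neg h3, if_pos (show PySem.Str.len
            (PySem.Str.strip (pvLstrip (PySem.Str.strip raw) "1234567890.- *")) ≤ 10 from by
              rcases not_and_or.mp h3 with h | h
              · rw [not_not.mp h]; decide
              · exact not_lt.mp h)]
        simp
    · rw [if_neg h2, if_pos (show PySem.Str.len (PySem.Str.strip raw) ≤ 15 ∨
          PySem.Str.startswith (PySem.Str.strip raw) "```" = true from by
            rcases not_and_or.mp h2 with h | h
            · exact Or.inl (not_lt.mp h)
            · exact Or.inr (not_not.mp h))]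
      simp
  · rw [if_neg hc1]
    by_cases hlb : PySem.Str.len (PySem.Str.strip raw) ≤ 15 ∨
        PySem.Str.startswith (PySem.Str.strip raw) "```" = true
    · rw [if_pos hlb]; simp
    · rw [if_neg hlb, if_pos hc1]; simp

theorem pvFoldLines_eq (ls : List String) (tasks : List (List (String × String))) :
    ls.foldl pvStepLineA tasks = tasks ++ (ls.filterMap pvLineTask).map pvTask := by
  induction ls generalizing tasks with
  | nil => simp
  | cons l ls ih =>
    simp only [List.foldl_cons, pvStepLineA_eq, List.filterMap_cons]
    cases h : pvLineTask l <;> simp [ih]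

theorem pvStepMsgA_eq (tasks : List (List (String × String))) (msg : List (String × String)) :
    pvStepMsgA tasks msg = tasks ++
      ((pvSplitNL (PySem.Dict.getD ⟨msg⟩ "content" "")).filterMap pvLineTask).map pvTask :=
  pvFoldLines_eq _ _

theorem pvTasksA_eq (messages : List (List (String × String)))
    (t0 : List (List (String × String))) :
    messages.foldl pvStepMsgA t0 = t0 ++ (pvCands messages).map pvTask := by
  induction messages generalizing t0 with
  | nil => simp [pvCands]
  | cons m ms ih =>
    rw [List.foldl_cons, pvStepMsgA_eq, ih]
    simp [pvCands, List.flatMap_cons]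

theorem pvDedupA_eq (cs : List String)
    (st : PySem.Set String × List (List (String × String))) :
    (cs.map pvTask).foldl pvDedupStepA st = pvDD cs st := by
  induction cs generalizing st with
  | nil => rfl
  | cons c cs ih =>
    simp only [List.map_cons, List.foldl_cons, pvDD]
    rw [show pvDedupStepA st (pvTask c) =
        (if PySem.Str.lower c ∉ st.1 ∧ st.2.length < 6 then
          (PySem.Set.add st.1 (PySem.Str.lower c), st.2 ++ [pvTask c]) else st) from by
          simp only [pvDedupStepA, pvGetD_task]]
    exact ih _

theorem pvDD_stop (cs : List String) (st : PySem.Set String × List (List (String × String)))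
    (h : 6 ≤ st.2.length) : pvDD cs st = st := by
  induction cs generalizing st with
  | nil => rfl
  | cons c cs ih =>
    simp only [pvDD]
    rw [if_neg (by omega), ih st h]

theorem pvDD_append (xs ys : List String)
    (st : PySem.Set String × List (List (String × String))) :
    pvDD (xs ++ ys) st = pvDD ys (pvDD xs st) := by
  induction xs generalizing st with
  | nil => rfl
  | cons x xs ih => simp only [List.cons_append, pvDD, ih]

theorem pvScanLines_eq (ls : List String) (seen : PySem.Set String)
    (acc : List (List (String × String))) (h : acc.length < 6) :
    pvScanLines ls seen acc = pvDD (ls.filterMap pvLineTask) (seen, acc) := by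
  induction ls generalizing seen acc with
  | nil => rfl
  | cons l ls ih =>
    simp only [pvScanLines, List.filterMap_cons]
    cases hl : pvLineTask l with
    | none => exact ih seen acc h
    | some clean =>
      simp only [pvDD]
      by_cases hm : PySem.Str.lower clean ∈ seen
      · rw [if_pos hm, if_neg (by simp [hm]), ih seen acc h]
      · rw [if_neg hm]
        by_cases hlen : 6 ≤ (acc ++ [pvTask clean]).length
        · rw [if_pos hlen,
            if_pos (show PySem.Str.lower clean ∉ seen ∧ acc.length < 6 from ⟨hm, h⟩),
            pvDD_stop _ _ hlen]
        · rw [if_neg hlen,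
            if_pos (show PySem.Str.lower clean ∉ seen ∧ acc.length < 6 from ⟨hm, h⟩)]
          exact ih _ _ (by omega)

theorem pvCollect_eq (messages : List (List (String × String))) (seen : PySem.Set String)
    (acc : List (List (String × String))) :
    pvCollect messages seen acc = (pvDD (pvCands messages) (seen, acc)).2 := by
  induction messages generalizing seen acc with
  | nil => rfl
  | cons m ms ih =>
    simp only [pvCollect, pvCands, List.flatMap_cons, pvDD_append]
    by_cases h : 6 ≤ acc.length
    · rw [if_pos h, pvDD_stop _ (seen, acc) h, pvDD_stop _ (seen, acc) h]
    · rw [if_neg h, pvScanLines_eq _ _ _ (by omega)]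
      exact ih _ _

-- ===== VERDICT (by name: the statement is the Claim_ definition above) =====
theorem extract_tasks_from_messages_spec : Claim_equal_extract_tasks_from_messages := by
  intro messages _
  unfold Spec_extract_tasks_from_messages
  unfold extract_tasks_from_messages extract_tasks_from_messages_alt
  simp only [pvTasksA_eq, List.nil_append, pvDedupA_eq, pvCollect_eq]
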